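-- pv_equiv track=rewrite | github.com/elifesciences/elife-bot | activity/activity_ModifyMecaXml.py | get_xml_author_transformations
-- ===== SOURCE A (Python) =====
-- def author_token_value(last_name, first_name):
--     "from author values compile a single token used for matching"
--     if not first_name:
--         return str(last_name)
--     return "%s, %s" % (last_name, first_name[0])
--
-- def get_xml_author_transformations(xml_author_list, author_details):
--     "compare author data and collect a list of XML modifications to make"
--     # map XML author name token to non-empty ORCID values
--     author_details_map = {}
--     for author_detail in author_details:
--         if not author_detail.get("ORCID"):
--             continue
--         author_token = author_token_value(
--             author_detail.get("last_name"), author_detail.get("first_name")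
--         )
--         author_details_map[author_token] = author_detail.get("ORCID")
--
--     # collect a list of XML modifications
--     xml_author_transformations = []
--     for xml_author in xml_author_list:
--         author_token = author_token_value(
--             xml_author.get("last_name"), xml_author.get("first_name")
--         )
--         if author_token not in author_details_map.keys():
--             continue
--         # compare ORCID value
--         if author_details_map.get(author_token):
--             # check if ORCID value exists in XML
--             if not xml_author.get("ORCID"):
--                 # add ORCID tag
--                 xml_author_transformations.append(
--                     {
--                         "action": "add",
--                         "author_token": author_token,
--                         "ORCID": author_details_map.get(author_token),
--                     }
--                 )
--             elif not xml_author.get("ORCID").endswith(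
--                 author_details_map.get(author_token)
--             ):
--                 # add additional ORCID tag
--                 xml_author_transformations.append(
--                     {
--                         "action": "add",
--                         "author_token": author_token,
--                         "ORCID": author_details_map.get(author_token),
--                     }
--                 )
--             else:
--                 # set authenticated attribute
--                 xml_author_transformations.append(
--                     {
--                         "action": "modify",
--                         "author_token": author_token,
--                         "ORCID": author_details_map.get(author_token),
--                     }
--                 )
--     return xml_author_transformations
-- ===== SOURCE B (Python) =====
-- def author_token_value(last_name, first_name):
--     "from author values compile a single token used for matching"
--     if not first_name:
--         return str(last_name)
--     return "%s, %s" % (last_name, first_name[0])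
--
-- def get_xml_author_transformations(xml_author_list, author_details):
--     "compare author data and collect a list of XML modifications to make"
--     transformations = []
--     for xml_author in xml_author_list:
--         token = author_token_value(
--             xml_author.get("last_name"), xml_author.get("first_name")
--         )
--         # scan author_details for the last truthy ORCID whose token matches
--         found = None
--         for detail in author_details:
--             orcid = detail.get("ORCID")
--             if orcid and author_token_value(
--                 detail.get("last_name"), detail.get("first_name")
--             ) == token:
--                 found = orcid
--         if found is None:
--             continue
--         xml_orcid = xml_author.get("ORCID")
--         action = "modify" if xml_orcid and xml_orcid.endswith(found) else "add"
--         transformations.append(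
--             {"action": action, "author_token": token, "ORCID": found}
--         )
--     return transformations
-- ===== Notes on version B (the rewrite author's own statement) =====
-- stated objective: simpler
-- what changed: Drops the precomputed token->ORCID dict: for each XML author B scans author_details directly, keeping the last matching truthy ORCID (which reproduces dict-overwrite last-wins), and collapses the two 'add' branches into one action expression.
import Mathlib
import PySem

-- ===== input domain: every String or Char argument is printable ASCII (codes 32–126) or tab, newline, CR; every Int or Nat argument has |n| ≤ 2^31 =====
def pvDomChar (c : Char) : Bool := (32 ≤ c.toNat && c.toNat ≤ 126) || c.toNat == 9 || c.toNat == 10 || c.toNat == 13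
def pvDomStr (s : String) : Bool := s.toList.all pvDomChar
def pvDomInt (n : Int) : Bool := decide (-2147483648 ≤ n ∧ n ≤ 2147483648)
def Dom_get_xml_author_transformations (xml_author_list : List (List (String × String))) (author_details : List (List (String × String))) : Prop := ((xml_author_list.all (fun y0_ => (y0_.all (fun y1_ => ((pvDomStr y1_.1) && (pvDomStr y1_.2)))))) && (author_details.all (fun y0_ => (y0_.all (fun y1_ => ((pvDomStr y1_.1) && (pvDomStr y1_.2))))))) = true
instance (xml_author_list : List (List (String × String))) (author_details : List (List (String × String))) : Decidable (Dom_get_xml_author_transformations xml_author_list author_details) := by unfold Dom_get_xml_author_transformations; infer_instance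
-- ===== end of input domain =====

-- B drops A's precomputed token→ORCID dict: each XML author scans author_details directly,
-- keeping the LAST matching truthy ORCID (dict-overwrite last-wins), and the two 'add'
-- branches collapse into one action expression.  Objective: simpler (same return value).

-- dict.get(k): first match in the association list (Python dict lookup)
def dget (d : List (String × String)) (k : String) : Option String :=
  (PySem.Dict.mk d).get? k

-- str(x) for x = a dict.get result: None prints as "None"
def pyStrOpt : Option String → String
  | none => "None"
  | some s => s

-- helper author_token_value(last_name, first_name), shared by both Pythons
def author_token_value (last first : Option String) : String :=
  match first with
  | none => pyStrOpt last
  | some f =>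
    match f.toList with
    | [] => pyStrOpt last                                   -- '' is falsy
    | c :: _ => pyStrOpt last ++ ", " ++ String.ofList [c]      -- "%s, %s" % (last, first[0])

-- ===== PORT A =====
def get_xml_author_transformations (xml_author_list : List (List (String × String))) (author_details : List (List (String × String))) : List (List (String × String)) :=
  let author_details_map : PySem.Dict String String :=
    author_details.foldl (fun m ad =>
      match dget ad "ORCID" with
      | none => m
      | some o =>
        if o = "" then m
        else m.insert (author_token_value (dget ad "last_name") (dget ad "first_name")) o)
      PySem.Dict.empty
  xml_author_list.foldl (fun acc xa =>
    let tok := author_token_value (dget xa "last_name") (dget xa "first_name")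
    if !(author_details_map.contains tok) then acc
    else
      match author_details_map.get? tok with
      | none => acc                     -- falsy map value: nothing appended
      | some o =>
        if o = "" then acc
        else
          match dget xa "ORCID" with
          | none => acc ++ [[("action", "add"), ("author_token", tok), ("ORCID", o)]]
          | some xo =>
            if xo = "" then acc ++ [[("action", "add"), ("author_token", tok), ("ORCID", o)]]
            else if !(PySem.Str.endswith xo o) then
              acc ++ [[("action", "add"), ("author_token", tok), ("ORCID", o)]]
            else acc ++ [[("action", "modify"), ("author_token", tok), ("ORCID", o)]])
    []

-- ===== PORT B =====
def get_xml_author_transformations_alt (xml_author_list : List (List (String × String))) (author_details : List (List (String × String))) : List (List (String × String)) :=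
  xml_author_list.foldl (fun acc xa =>
    let tok := author_token_value (dget xa "last_name") (dget xa "first_name")
    let found := author_details.foldl (fun f ad =>
      match dget ad "ORCID" with
      | none => f
      | some o =>
        if o = "" then f
        else if author_token_value (dget ad "last_name") (dget ad "first_name") = tok then some o
        else f) none
    match found with
    | none => acc
    | some o =>
      let action :=
        match dget xa "ORCID" with
        | none => "add"
        | some xo => if xo ≠ "" ∧ PySem.Str.endswith xo o then "modify" else "add"
      acc ++ [[("action", action), ("author_token", tok), ("ORCID", o)]])
    []

-- ===== PRECONDITION & SPEC =====
def Spec_get_xml_author_transformations (xml_author_list : List (List (String × String))) (author_details : List (List (String × String))) (out : List (List (String × String))) : Prop := out = get_xml_author_transformations_alt xml_author_list author_details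
instance (xml_author_list : List (List (String × String))) (author_details : List (List (String × String))) (out : List (List (String × String))) : Decidable (Spec_get_xml_author_transformations xml_author_list author_details out) := by unfold Spec_get_xml_author_transformations; infer_instance

-- ===== CLAIM (what is proved, stated in full; the proofs are below) =====
def Claim_equal_get_xml_author_transformations : Prop := ∀ (xml_author_list : List (List (String × String))) (author_details : List (List (String × String))), Dom_get_xml_author_transformations xml_author_list author_details → Spec_get_xml_author_transformations xml_author_list author_details (get_xml_author_transformations xml_author_list author_details)

-- ===== LEMMAS AND PROOFS =====

-- B's inner scan over the details, with an explicit accumulator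
def scanStep (tok : String) (f : Option String) (ad : List (String × String)) : Option String :=
  match dget ad "ORCID" with
  | none => f
  | some o =>
    if o = "" then f
    else if author_token_value (dget ad "last_name") (dget ad "first_name") = tok then some o
    else f

-- A's map-building step
def mapStep (m : PySem.Dict String String) (ad : List (String × String)) : PySem.Dict String String :=
  match dget ad "ORCID" with
  | none => m
  | some o =>
    if o = "" then m
    else m.insert (author_token_value (dget ad "last_name") (dget ad "first_name")) o

-- lookup in A's map = B's linear scan (last truthy match wins, like dict overwrite)
theorem mapGet_eq_scan (ads : List (List (String × String))) (m : PySem.Dict String String)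
    (tok : String) :
    (ads.foldl mapStep m).get? tok = ads.foldl (scanStep tok) (m.get? tok) := by
  induction ads generalizing m with
  | nil => rfl
  | cons ad rest ih =>
    simp only [List.foldl_cons]
    rw [ih]
    congr 1
    unfold mapStep scanStep
    cases dget ad "ORCID" with
    | none => rfl
    | some o =>
      by_cases ho : o = ""
      · simp [ho]
      · simp only [ho, if_false]
        by_cases ht : author_token_value (dget ad "last_name") (dget ad "first_name") = tok
        · rw [if_pos ht, ht, PySem.Dict.get?_insert_self]
        · rw [if_neg ht, PySem.Dict.get?_insert_of_ne _ _ (fun h => ht h.symm)]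

-- the scan never yields the empty string
theorem scan_ne_empty (ads : List (List (String × String))) (tok : String)
    (f : Option String) (hf : f ≠ some "") :
    ads.foldl (scanStep tok) f ≠ some "" := by
  induction ads generalizing f with
  | nil => exact hf
  | cons ad rest ih =>
    simp only [List.foldl_cons]
    apply ih
    unfold scanStep
    cases dget ad "ORCID" with
    | none => exact hf
    | some o =>
      by_cases ho : o = ""
      · simpa [ho] using hf
      · simp only [if_neg ho]
        split
        · simpa using ho
        · exact hf

theorem get_xml_author_transformations_eq (xml_author_list author_details : List (List (String × String))) :
    get_xml_author_transformations xml_author_list author_details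
      = get_xml_author_transformations_alt xml_author_list author_details := by
  unfold get_xml_author_transformations get_xml_author_transformations_alt
  apply PySem.List.foldl_congr_mem
  intro acc xa _
  simp only []
  set tok := author_token_value (dget xa "last_name") (dget xa "first_name") with htok
  have hmap : (author_details.foldl mapStep PySem.Dict.empty).get? tok
      = author_details.foldl (scanStep tok) none := by
    rw [mapGet_eq_scan]; simp [PySem.Dict.get?_empty]
  have hfold : (author_details.foldl (fun m ad =>
      match dget ad "ORCID" with
      | none => m
      | some o =>
        if o = "" then m
        else m.insert (author_token_value (dget ad "last_name") (dget ad "first_name")) o)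
      PySem.Dict.empty) = author_details.foldl mapStep PySem.Dict.empty := rfl
  have hscan : (author_details.foldl (fun f ad =>
      match dget ad "ORCID" with
      | none => f
      | some o =>
        if o = "" then f
        else if author_token_value (dget ad "last_name") (dget ad "first_name") = tok then some o
        else f) none) = author_details.foldl (scanStep tok) none := rfl
  rw [hfold, hscan]
  set m := author_details.foldl mapStep PySem.Dict.empty with hm
  cases hs : author_details.foldl (scanStep tok) none with
  | none =>
    have hc : m.contains tok = false :=
      (PySem.Dict.get?_eq_none_iff_contains m tok).mp (by rw [hmap, hs])
    simp [hc]
  | some o =>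
    have ho : o ≠ "" := by
      intro h; exact scan_ne_empty author_details tok none (by simp) (h ▸ hmap ▸ hs)
    have hg : m.get? tok = some o := by rw [hmap, hs]
    have hc : m.contains tok = true := by
      by_contra hcf
      have h0 := (PySem.Dict.get?_eq_none_iff_contains m tok).mpr (by simpa using hcf)
      simp [hg] at h0
    simp only [hc, Bool.not_true, Bool.false_eq_true, if_false, hg]
    rw [if_neg ho]
    cases dget xa "ORCID" with
    | none => rfl
    | some xo =>
      by_cases hxo : xo = ""
      · simp [hxo]
      · cases he : PySem.Chars.endswith xo.toList o.toList <;> simp [hxo, PySem.Str.endswith, he]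

-- ===== VERDICT (by name: the statement is the Claim_ definition above) =====
theorem get_xml_author_transformations_spec : Claim_equal_get_xml_author_transformations := by
  intro xs ds _
  unfold Spec_get_xml_author_transformations
  exact get_xml_author_transformations_eq xs ds
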